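-- pv_equiv track=rewrite | github.com/AstroBai/GuitarChords | GuitarChords.py | _is_muted_subset_shape
-- ===== SOURCE A (Python) =====
-- def _is_muted_subset_shape(fuller_shape, sparse_shape):
--     muted_from_fuller = False
--     for full_fret, sparse_fret in zip(fuller_shape, sparse_shape):
--         if sparse_fret == full_fret:
--             continue
--         if sparse_fret < 0 and full_fret >= 0:
--             muted_from_fuller = True
--             continue
--         return False
--     return muted_from_fuller
-- ===== SOURCE B (Python) =====
-- def _is_muted_subset_shape(fuller_shape, sparse_shape):
--     pairs = list(zip(fuller_shape, sparse_shape))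
--     valid = all(s == f or (s < 0 and f >= 0) for f, s in pairs)
--     muted = any(s < 0 and f >= 0 for f, s in pairs)
--     return valid and muted
-- ===== Notes on version B (the rewrite author's own statement) =====
-- stated objective: simpler
-- what changed: Replaced the stateful early-exit loop with a mutable flag by two declarative quantifier passes over zip(fuller_shape, sparse_shape): an all() validity check and an any() mute-presence check, returning their conjunction.
import Mathlib
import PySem

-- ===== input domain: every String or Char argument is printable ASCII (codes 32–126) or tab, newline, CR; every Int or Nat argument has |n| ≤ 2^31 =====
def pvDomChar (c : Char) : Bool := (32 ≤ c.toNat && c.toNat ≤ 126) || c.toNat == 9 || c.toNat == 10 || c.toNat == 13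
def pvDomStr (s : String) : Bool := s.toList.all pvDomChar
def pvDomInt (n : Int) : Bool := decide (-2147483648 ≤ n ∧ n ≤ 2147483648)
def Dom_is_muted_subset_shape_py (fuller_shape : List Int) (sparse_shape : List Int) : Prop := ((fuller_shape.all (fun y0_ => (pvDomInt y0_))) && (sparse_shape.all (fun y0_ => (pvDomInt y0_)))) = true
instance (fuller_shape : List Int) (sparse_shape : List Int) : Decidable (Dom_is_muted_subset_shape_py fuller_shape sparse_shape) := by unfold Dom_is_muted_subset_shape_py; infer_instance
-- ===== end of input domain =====

-- ===== PORT A =====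
-- header: B replaces A's stateful early-exit loop by two quantifier passes (all/any) over the zipped pairs; objective: simpler.
-- loop of A: structural recursion over the zipped lists carrying the mutable flag
def pvLoopA : List Int → List Int → Bool → Bool
  | f :: fs, s :: ss, m =>
    if s == f then pvLoopA fs ss m
    else if s < 0 && f ≥ 0 then pvLoopA fs ss true
    else false
  | _, _, m => m

def is_muted_subset_shape_py (fuller_shape : List Int) (sparse_shape : List Int) : Bool :=
  pvLoopA fuller_shape sparse_shape false

-- ===== PORT B =====
def is_muted_subset_shape_py_alt (fuller_shape : List Int) (sparse_shape : List Int) : Bool :=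
  let pairs := fuller_shape.zip sparse_shape
  let valid := pairs.all (fun p => p.2 == p.1 || (p.2 < 0 && p.1 ≥ 0))
  let muted := pairs.any (fun p => p.2 < 0 && p.1 ≥ 0)
  valid && muted

-- ===== PRECONDITION & SPEC =====
def Spec_is_muted_subset_shape_py (fuller_shape : List Int) (sparse_shape : List Int) (out : Bool) : Prop := out = is_muted_subset_shape_py_alt fuller_shape sparse_shape
instance (fuller_shape : List Int) (sparse_shape : List Int) (out : Bool) : Decidable (Spec_is_muted_subset_shape_py fuller_shape sparse_shape out) := by unfold Spec_is_muted_subset_shape_py; infer_instance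

-- ===== CLAIM (what is proved, stated in full; the proofs are below) =====
def Claim_equal_is_muted_subset_shape_py : Prop := ∀ (fuller_shape : List Int) (sparse_shape : List Int), Dom_is_muted_subset_shape_py fuller_shape sparse_shape → Spec_is_muted_subset_shape_py fuller_shape sparse_shape (is_muted_subset_shape_py fuller_shape sparse_shape)

-- ===== LEMMAS AND PROOFS =====

-- ===== VERDICT (by name: the statement is the Claim_ definition above) =====
lemma pvLoopA_eq (fs ss : List Int) (m : Bool) :
    pvLoopA fs ss m =
      ((fs.zip ss).all (fun p => p.2 == p.1 || (p.2 < 0 && p.1 ≥ 0)) &&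
       (m || (fs.zip ss).any (fun p => p.2 < 0 && p.1 ≥ 0))) := by
  induction fs generalizing ss m with
  | nil => simp [pvLoopA]
  | cons f fs ih =>
    cases ss with
    | nil => simp [pvLoopA]
    | cons s ss =>
      by_cases h1 : s = f
      · subst h1
        by_cases h2 : (s < 0 && s ≥ 0) = true
        · simp at h2; omega
        · simp [pvLoopA, ih, h2]
      · by_cases h2 : (s < 0 && f ≥ 0) = true
        · simp [pvLoopA, h1, h2, ih]
        · simp [pvLoopA, h1, h2]

theorem is_muted_subset_shape_py_spec : Claim_equal_is_muted_subset_shape_py := by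
  intro fs ss _
  unfold Spec_is_muted_subset_shape_py is_muted_subset_shape_py is_muted_subset_shape_py_alt
  simp [pvLoopA_eq]
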